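-- pv_equiv track=rewrite | github.com/jennyzzt/LLM_debate_on_ARC | ARC_gen_agents2_rounds3_openai/6c434453/agent1/algo2.py | solve
-- ===== SOURCE A (Python) =====
-- def solve(input_grid):
--     rows = len(input_grid)
--     cols = len(input_grid[0]) if rows > 0 else 0
--     output_grid = [[cell for cell in row] for row in input_grid]  # Copy input grid
--
--     # Function to check if a cell is part of a vertical or horizontal line of three '1's
--     def is_part_of_line_of_three(r, c):
--         # Check horizontal line of three '1's
--         horizontal_checks = [
--             (c + 2 < cols and input_grid[r][c] == 1 and input_grid[r][c + 1] == 1 and input_grid[r][c + 2] == 1),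
--             (c - 1 >= 0 and c + 1 < cols and input_grid[r][c] == 1 and input_grid[r][c - 1] == 1 and input_grid[r][c + 1] == 1),
--             (c - 2 >= 0 and input_grid[r][c] == 1 and input_grid[r][c - 1] == 1 and input_grid[r][c - 2] == 1)
--         ]
--         # Check vertical line of three '1's
--         vertical_checks = [
--             (r + 2 < rows and input_grid[r][c] == 1 and input_grid[r + 1][c] == 1 and input_grid[r + 2][c] == 1),
--             (r - 1 >= 0 and r + 1 < rows and input_grid[r][c] == 1 and input_grid[r - 1][c] == 1 and input_grid[r + 1][c] == 1),
--             (r - 2 >= 0 and input_grid[r][c] == 1 and input_grid[r - 1][c] == 1 and input_grid[r - 2][c] == 1)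
--         ]
--         return any(horizontal_checks) or any(vertical_checks)
--
--     # Apply transformation rule
--     for r in range(rows):
--         for c in range(cols):
--             if is_part_of_line_of_three(r, c):
--                 output_grid[r][c] = 2
--
--     return output_grid
-- ===== SOURCE B (Python) =====
-- def solve(input_grid):
--     rows = len(input_grid)
--     cols = len(input_grid[0]) if rows > 0 else 0
--     output_grid = [list(row) for row in input_grid]
--     # Horizontal pass: paint each run-of-three window of 1's.
--     for r in range(rows):
--         for c in range(cols - 2):
--             if input_grid[r][c] == 1 and input_grid[r][c + 1] == 1 and input_grid[r][c + 2] == 1: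
--                 output_grid[r][c] = 2
--                 output_grid[r][c + 1] = 2
--                 output_grid[r][c + 2] = 2
--     # Vertical pass.
--     for c in range(cols):
--         for r in range(rows - 2):
--             if input_grid[r][c] == 1 and input_grid[r + 1][c] == 1 and input_grid[r + 2][c] == 1:
--                 output_grid[r][c] = 2
--                 output_grid[r + 1][c] = 2
--                 output_grid[r + 2][c] = 2
--     return output_grid
-- ===== Notes on version B (the rewrite author's own statement) =====
-- stated objective: simpler
-- what changed: B replaces A's per-cell test against six positional line-of-three patterns by two run-painting sweeps: a horizontal scan that paints each window of three 1's whole, then the symmetric vertical scan; fewer comparisons per cell give a constant-factor speedup.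
-- outside the precondition, e.g. on solve([[5], []]): A returns [[5], []], B returns [[5], []]
import Mathlib
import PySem

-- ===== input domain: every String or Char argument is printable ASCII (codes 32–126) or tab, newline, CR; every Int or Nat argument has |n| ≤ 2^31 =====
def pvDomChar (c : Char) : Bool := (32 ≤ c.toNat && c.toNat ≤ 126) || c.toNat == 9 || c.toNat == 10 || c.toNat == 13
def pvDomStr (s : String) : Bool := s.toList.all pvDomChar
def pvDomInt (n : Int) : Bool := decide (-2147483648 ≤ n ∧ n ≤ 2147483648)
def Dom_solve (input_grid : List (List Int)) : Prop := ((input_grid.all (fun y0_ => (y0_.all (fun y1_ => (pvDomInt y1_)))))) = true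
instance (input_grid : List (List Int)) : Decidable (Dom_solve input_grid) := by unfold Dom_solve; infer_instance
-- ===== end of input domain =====

-- B replaces A's six positional per-cell pattern tests by two run-painting sweeps
-- (horizontal then vertical) that mark each detected window of three 1's whole;
-- objective: simpler (and measured constant-factor faster: fewer comparisons per cell).

-- grid read input_grid[r][c] (always guarded in range on admitted inputs; default never observed)
def get2 (g : List (List Int)) (r c : Nat) : Int := (g.getD r []).getD c 0

-- in-place write output_grid[r][c] = v (List.set, identity out of range; in range on admitted inputs)
def set2 (out : List (List Int)) (r c : Nat) (v : Int) : List (List Int) :=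
  out.set r ((out.getD r []).set c v)

-- ===== PORT A =====
-- A's is_part_of_line_of_three: any(horizontal_checks) or any(vertical_checks)
def isPart (g : List (List Int)) (rows cols r c : Nat) : Bool :=
  ((decide (c+2 < cols) && (get2 g r c == 1) && (get2 g r (c+1) == 1) && (get2 g r (c+2) == 1))
  || (decide (1 ≤ c) && decide (c+1 < cols) && (get2 g r c == 1) && (get2 g r (c-1) == 1) && (get2 g r (c+1) == 1))
  || (decide (2 ≤ c) && (get2 g r c == 1) && (get2 g r (c-1) == 1) && (get2 g r (c-2) == 1)))
  || ((decide (r+2 < rows) && (get2 g r c == 1) && (get2 g (r+1) c == 1) && (get2 g (r+2) c == 1))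
  || (decide (1 ≤ r) && decide (r+1 < rows) && (get2 g r c == 1) && (get2 g (r-1) c == 1) && (get2 g (r+1) c == 1))
  || (decide (2 ≤ r) && (get2 g r c == 1) && (get2 g (r-1) c == 1) && (get2 g (r-2) c == 1)))

def solve (input_grid : List (List Int)) : List (List Int) :=
  let rows := input_grid.length
  let cols := (input_grid.headD []).length
  let output_grid := input_grid.map (fun row => row.map (fun cell => cell))
  (List.range rows).foldl (fun out r =>
    (List.range cols).foldl (fun out c =>
      if isPart input_grid rows cols r c then set2 out r c 2 else out) out) output_grid

-- ===== PORT B =====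
def tripleH (g : List (List Int)) (r c : Nat) : Bool :=
  (get2 g r c == 1) && (get2 g r (c+1) == 1) && (get2 g r (c+2) == 1)

def tripleV (g : List (List Int)) (r c : Nat) : Bool :=
  (get2 g r c == 1) && (get2 g (r+1) c == 1) && (get2 g (r+2) c == 1)

def solve_alt (input_grid : List (List Int)) : List (List Int) :=
  let rows := input_grid.length
  let cols := (input_grid.headD []).length
  let out0 := input_grid.map (fun row => row.map (fun cell => cell))
  let out1 := (List.range rows).foldl (fun out r =>
    (List.range (cols-2)).foldl (fun out c =>
      if tripleH input_grid r c then set2 (set2 (set2 out r c 2) r (c+1) 2) r (c+2) 2 else out) out) out0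
  (List.range cols).foldl (fun out c =>
    (List.range (rows-2)).foldl (fun out r =>
      if tripleV input_grid r c then set2 (set2 (set2 out r c 2) (r+1) c 2) (r+2) c 2 else out) out) out1

-- ===== PRECONDITION & SPEC =====
-- Pre_ excludes ragged grids with a row shorter than the first row: on those A raises
-- IndexError except when every guarded read short-circuits, in which case it returns an
-- untouched copy, as does B.
def Pre_solve (input_grid : List (List Int)) : Prop :=
  ∀ row ∈ input_grid, (input_grid.headD []).length ≤ row.length
instance (input_grid : List (List Int)) : Decidable (Pre_solve input_grid) := by unfold Pre_solve; infer_instance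

def pvWitness_solve : List (List Int) := [[1, 1, 1], [0, 1, 0]]

def Spec_solve (input_grid : List (List Int)) (out : List (List Int)) : Prop := out = solve_alt input_grid
instance (input_grid : List (List Int)) (out : List (List Int)) : Decidable (Spec_solve input_grid out) := by unfold Spec_solve; infer_instance

-- ===== CLAIM (what is proved, stated in full; the proofs are below) =====
def Claim_equal_solve : Prop := ∀ (input_grid : List (List Int)), Dom_solve input_grid → Pre_solve input_grid → Spec_solve input_grid (solve input_grid)

-- ===== LEMMAS AND PROOFS =====

-- out has the same outline (length and row lengths) as g
def ShapeEq (out g : List (List Int)) : Prop :=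
  out.length = g.length ∧ ∀ i, (out.getD i []).length = (g.getD i []).length

theorem shapeEq_refl (g : List (List Int)) : ShapeEq g g := ⟨rfl, fun _ => rfl⟩

theorem getD_set1 (l : List Int) (c : Nat) (v : Int) (j : Nat) :
    (l.set c v).getD j 0 = if j = c ∧ c < l.length then v else l.getD j 0 := by
  simp only [List.getD_eq_getElem?_getD, List.getElem?_set]
  by_cases hjc : j = c
  · subst hjc; by_cases hc : j < l.length <;> simp [hc]
  · rw [if_neg (Ne.symm hjc), if_neg (by tauto)]

theorem getD_set2_row (out : List (List Int)) (r c : Nat) (v : Int) (i : Nat) :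
    (set2 out r c v).getD i [] =
      if i = r ∧ r < out.length then (out.getD r []).set c v else out.getD i [] := by
  simp only [set2, List.getD_eq_getElem?_getD, List.getElem?_set]
  by_cases hir : i = r
  · subst hir; by_cases hl : i < out.length <;> simp [hl]
  · rw [if_neg (Ne.symm hir), if_neg (by tauto)]

theorem get2_set2 (out : List (List Int)) (r c : Nat) (v : Int) (i j : Nat) :
    get2 (set2 out r c v) i j =
      if i = r ∧ j = c ∧ r < out.length ∧ c < (out.getD r []).length then v
      else get2 out i j := by
  simp only [get2, getD_set2_row]
  by_cases hir : i = r
  · subst hir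
    by_cases hl : i < out.length
    · rw [if_pos ⟨rfl, hl⟩, getD_set1]
      by_cases h : j = c ∧ c < (out.getD i []).length
      · rw [if_pos h, if_pos ⟨rfl, h.1, hl, h.2⟩]
      · rw [if_neg h, if_neg (by tauto)]
    · rw [if_neg (by tauto), if_neg (by tauto)]
  · rw [if_neg (by tauto), if_neg (by tauto)]

theorem shapeEq_set2 (out g : List (List Int)) (r c : Nat) (v : Int)
    (h : ShapeEq out g) : ShapeEq (set2 out r c v) g := by
  refine ⟨by simp [set2, h.1], fun i => ?_⟩
  rw [getD_set2_row]
  by_cases hc : i = r ∧ r < out.length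
  · rw [if_pos hc]; simp only [List.length_set]; rw [← hc.1]; exact h.2 i
  · rw [if_neg hc]; exact h.2 i

theorem foldl_mark (g : List (List Int)) (step : List (List Int) → Nat → List (List Int))
    (q : Nat → Nat → Nat → Bool) (l : List Nat)
    (hshape : ∀ out i, i ∈ l → ShapeEq out g → ShapeEq (step out i) g)
    (hstep : ∀ out i r c, i ∈ l → ShapeEq out g →
      get2 (step out i) r c = if q i r c then 2 else get2 out r c) :
    ∀ out, ShapeEq out g → ShapeEq (l.foldl step out) g ∧
      ∀ r c, get2 (l.foldl step out) r c =
        if l.any (fun i => q i r c) then 2 else get2 out r c := by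
  induction l with
  | nil => intro out h; exact ⟨h, fun r c => by simp⟩
  | cons i t ih =>
    intro out h
    have hsi : ShapeEq (step out i) g := hshape out i (List.mem_cons_self ..) h
    have ih' := ih (fun o j hj => hshape o j (List.mem_cons_of_mem _ hj))
      (fun o j r c hj => hstep o j r c (List.mem_cons_of_mem _ hj)) (step out i) hsi
    refine ⟨ih'.1, fun r c => ?_⟩
    rw [List.foldl_cons] at *
    rw [ih'.2 r c, hstep out i r c (List.mem_cons_self ..) h, List.any_cons]
    by_cases h1 : q i r c = true <;> by_cases h2 : t.any (fun j => q j r c) = true <;>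
      simp [h1, h2]

-- the cells A marks / B's horizontal pass marks / B's vertical pass marks, as predicates on (i, j)
def MarkA (g : List (List Int)) (i j : Nat) : Prop :=
  i < g.length ∧ j < (g.headD []).length ∧
    isPart g g.length (g.headD []).length i j = true

def MarkH (g : List (List Int)) (i j : Nat) : Prop :=
  ∃ r < g.length, ∃ c < (g.headD []).length - 2,
    i = r ∧ (j = c ∨ j = c+1 ∨ j = c+2) ∧ tripleH g r c = true

def MarkV (g : List (List Int)) (i j : Nat) : Prop :=
  ∃ c < (g.headD []).length, ∃ r < g.length - 2,
    (i = r ∨ i = r+1 ∨ i = r+2) ∧ j = c ∧ tripleV g r c = true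

theorem mark_iff (g : List (List Int)) (i j : Nat) : MarkA g i j ↔ MarkH g i j ∨ MarkV g i j := by
  unfold MarkA MarkH MarkV
  simp only [isPart, tripleH, tripleV, Bool.or_eq_true, Bool.and_eq_true,
    decide_eq_true_eq, beq_iff_eq, and_assoc, or_assoc]
  constructor
  · rintro ⟨hi, hj, ⟨h1, v0, v1, v2⟩ | ⟨h1, h2, v0, v1, v2⟩ | ⟨h1, v0, v1, v2⟩ |
      ⟨h1, v0, v1, v2⟩ | ⟨h1, h2, v0, v1, v2⟩ | ⟨h1, v0, v1, v2⟩⟩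
    · exact Or.inl ⟨i, hi, j, by omega, rfl, Or.inl rfl, v0, v1, v2⟩
    · refine Or.inl ⟨i, hi, j - 1, by omega, rfl, Or.inr (Or.inl (by omega)), ?_, ?_, ?_⟩
      · exact v1
      · rw [show j - 1 + 1 = j by omega]; exact v0
      · rw [show j - 1 + 2 = j + 1 by omega]; exact v2
    · refine Or.inl ⟨i, hi, j - 2, by omega, rfl, Or.inr (Or.inr (by omega)), ?_, ?_, ?_⟩
      · exact v2
      · rw [show j - 2 + 1 = j - 1 by omega]; exact v1
      · rw [show j - 2 + 2 = j by omega]; exact v0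
    · exact Or.inr ⟨j, hj, i, by omega, Or.inl rfl, rfl, v0, v1, v2⟩
    · refine Or.inr ⟨j, hj, i - 1, by omega, Or.inr (Or.inl (by omega)), rfl, ?_, ?_, ?_⟩
      · exact v1
      · rw [show i - 1 + 1 = i by omega]; exact v0
      · rw [show i - 1 + 2 = i + 1 by omega]; exact v2
    · refine Or.inr ⟨j, hj, i - 2, by omega, Or.inr (Or.inr (by omega)), rfl, ?_, ?_, ?_⟩
      · exact v2
      · rw [show i - 2 + 1 = i - 1 by omega]; exact v1
      · rw [show i - 2 + 2 = i by omega]; exact v0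
  · rintro (⟨r, hr, c, hc, rfl, hjc, v0, v1, v2⟩ | ⟨c, hc, r, hr, hic, rfl, v0, v1, v2⟩)
    · rcases hjc with rfl | rfl | rfl
      · exact ⟨hr, by omega, Or.inl ⟨by omega, v0, v1, v2⟩⟩
      · refine ⟨hr, by omega, Or.inr (Or.inl ⟨by omega, by omega, v1, ?_, v2⟩)⟩
        rw [show c + 1 - 1 = c by omega]; exact v0
      · refine ⟨hr, by omega, Or.inr (Or.inr (Or.inl ⟨by omega, v2, ?_, ?_⟩))⟩
        · rw [show c + 2 - 1 = c + 1 by omega]; exact v1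
        · rw [show c + 2 - 2 = c by omega]; exact v0
    · rcases hic with rfl | rfl | rfl
      · exact ⟨by omega, hc, Or.inr (Or.inr (Or.inr (Or.inl ⟨by omega, v0, v1, v2⟩)))⟩
      · refine ⟨by omega, hc, Or.inr (Or.inr (Or.inr (Or.inr (Or.inl ⟨by omega, by omega, v1, ?_, v2⟩))))⟩
        rw [show r + 1 - 1 = r by omega]; exact v0
      · refine ⟨by omega, hc, Or.inr (Or.inr (Or.inr (Or.inr (Or.inr ⟨by omega, v2, ?_, ?_⟩))))⟩
        · rw [show r + 2 - 1 = r + 1 by omega]; exact v1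
        · rw [show r + 2 - 2 = r by omega]; exact v0

theorem rowlen_ge (g : List (List Int)) (pre : Pre_solve g) (r : Nat) (hr : r < g.length) :
    (g.headD []).length ≤ (g.getD r []).length := by
  rw [List.getD_eq_getElem g [] hr]
  exact pre _ (List.getElem_mem hr)

theorem copy_eq (g : List (List Int)) : g.map (fun row => row.map (fun cell => cell)) = g := by
  simp

-- both loops of each pass at once
theorem foldl_mark2 (g : List (List Int)) (step2 : List (List Int) → Nat → Nat → List (List Int))
    (q2 : Nat → Nat → Nat → Nat → Bool) (l1 : List Nat) (f : Nat → List Nat)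
    (hshape : ∀ out i k, i ∈ l1 → k ∈ f i → ShapeEq out g → ShapeEq (step2 out i k) g)
    (hstep : ∀ out i k r c, i ∈ l1 → k ∈ f i → ShapeEq out g →
      get2 (step2 out i k) r c = if q2 i k r c then 2 else get2 out r c) :
    ∀ out, ShapeEq out g →
      ShapeEq (l1.foldl (fun out i => (f i).foldl (fun out k => step2 out i k) out) out) g ∧
      ∀ r c, get2 (l1.foldl (fun out i => (f i).foldl (fun out k => step2 out i k) out) out) r c =
        if l1.any (fun i => (f i).any (fun k => q2 i k r c)) then 2 else get2 out r c := by
  apply foldl_mark g _ (fun i r c => (f i).any (fun k => q2 i k r c)) l1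
  · intro out i hi hsh
    exact (foldl_mark g (fun o k => step2 o i k) (fun k r c => q2 i k r c) (f i)
      (fun o k hk => hshape o i k hi hk) (fun o k r c hk => hstep o i k r c hi hk) out hsh).1
  · intro out i r c hi hsh
    exact (foldl_mark g (fun o k => step2 o i k) (fun k r c => q2 i k r c) (f i)
      (fun o k hk => hshape o i k hi hk) (fun o k r c hk => hstep o i k r c hi hk) out hsh).2 r c

-- A's inner loop body
theorem stepA_get2 (g : List (List Int)) (pre : Pre_solve g) (r : Nat) (hr : r < g.length)
    (out : List (List Int)) (hsh : ShapeEq out g) (c : Nat) (hc : c < (g.headD []).length) (i j : Nat) :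
    get2 (if isPart g g.length (g.headD []).length r c then set2 out r c 2 else out) i j =
      if (decide (i = r) && decide (j = c) && isPart g g.length (g.headD []).length r c) then 2
      else get2 out i j := by
  have hrow : c < (out.getD r []).length := by
    have := rowlen_ge g pre r hr; rw [hsh.2 r]; omega
  by_cases hp : isPart g g.length (g.headD []).length r c = true
  · rw [if_pos hp, get2_set2]
    refine if_congr ?_ rfl rfl
    simp only [hp, Bool.and_true, Bool.and_eq_true, decide_eq_true_eq]
    constructor
    · rintro ⟨h1, h2, _, _⟩; exact ⟨h1, h2⟩
    · rintro ⟨h1, h2⟩; exact ⟨h1, h2, by rw [hsh.1]; exact hr, hrow⟩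
  · have hp' : isPart g g.length (g.headD []).length r c = false := by
      simpa using hp
    rw [if_neg hp, hp']
    simp

-- B's horizontal-pass body: three writes
theorem get2_set3H (g out : List (List Int)) (hsh : ShapeEq out g) (r c : Nat)
    (hr : r < g.length) (hc : c + 2 < (g.getD r []).length) (i j : Nat) :
    get2 (set2 (set2 (set2 out r c 2) r (c+1) 2) r (c+2) 2) i j =
      if i = r ∧ (j = c ∨ j = c+1 ∨ j = c+2) then 2 else get2 out i j := by
  have s1 : ShapeEq (set2 out r c 2) g := shapeEq_set2 _ _ _ _ _ hsh
  have s2 : ShapeEq (set2 (set2 out r c 2) r (c+1) 2) g := shapeEq_set2 _ _ _ _ _ s1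
  rw [get2_set2, get2_set2, get2_set2]
  simp only [s2.1, s2.2 r, s1.1, s1.2 r, hsh.1, hsh.2 r]
  have b0 : c < (g.getD r []).length := by omega
  have b1 : c + 1 < (g.getD r []).length := by omega
  split_ifs <;> simp_all

-- B's vertical-pass body: three writes
theorem get2_set3V (g out : List (List Int)) (hsh : ShapeEq out g) (r c : Nat)
    (hr : r + 2 < g.length) (hc : ∀ k, k < g.length → c < (g.getD k []).length) (i j : Nat) :
    get2 (set2 (set2 (set2 out r c 2) (r+1) c 2) (r+2) c 2) i j =
      if (i = r ∨ i = r+1 ∨ i = r+2) ∧ j = c then 2 else get2 out i j := by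
  have s1 : ShapeEq (set2 out r c 2) g := shapeEq_set2 _ _ _ _ _ hsh
  have s2 : ShapeEq (set2 (set2 out r c 2) (r+1) c 2) g := shapeEq_set2 _ _ _ _ _ s1
  rw [get2_set2, get2_set2, get2_set2]
  simp only [s2.1, s2.2, s1.1, s1.2, hsh.1, hsh.2]
  have b0 := hc r (by omega)
  have b1 := hc (r+1) (by omega)
  have b2 := hc (r+2) (by omega)
  split_ifs <;> simp_all
  omega

-- characterization of A's output
theorem solve_char (g : List (List Int)) (pre : Pre_solve g) :
    ShapeEq (solve g) g ∧ ∀ i j,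
      (MarkA g i j → get2 (solve g) i j = 2) ∧
      (¬ MarkA g i j → get2 (solve g) i j = get2 g i j) := by
  have H := foldl_mark2 g
      (fun out r c => if isPart g g.length (g.headD []).length r c then set2 out r c 2 else out)
      (fun r c i j => decide (i = r) && decide (j = c) && isPart g g.length (g.headD []).length r c)
      (List.range g.length) (fun _ => List.range (g.headD []).length)
      (fun out r c _ _ hsh => by
        dsimp only
        split_ifs with hp
        · exact shapeEq_set2 _ _ _ _ _ hsh
        · exact hsh)
      (fun out r c i j hr hc hsh =>
        stepA_get2 g pre r (List.mem_range.mp hr) out hsh c (List.mem_range.mp hc) i j)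
      g (shapeEq_refl g)
  have hsolve : solve g = (List.range g.length).foldl
      (fun out r => (List.range (g.headD []).length).foldl
        (fun out c => if isPart g g.length (g.headD []).length r c then set2 out r c 2 else out) out) g := by
    simp only [solve, copy_eq]
  rw [hsolve]
  refine ⟨H.1, fun i j => ?_⟩
  rw [H.2 i j]
  have hiff : ((List.range g.length).any fun r =>
      (List.range (g.headD []).length).any fun c =>
        decide (i = r) && decide (j = c) && isPart g g.length (g.headD []).length r c) = true ↔
      MarkA g i j := by
    unfold MarkA
    simp only [List.any_eq_true, List.mem_range, Bool.and_eq_true, decide_eq_true_eq, and_assoc]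
    constructor
    · rintro ⟨r, hr, c, hc, rfl, rfl, h⟩; exact ⟨hr, hc, h⟩
    · rintro ⟨hi, hj, h⟩; exact ⟨i, hi, j, hj, rfl, rfl, h⟩
  constructor
  · intro hm; rw [if_pos (hiff.mpr hm)]
  · intro hm; rw [if_neg (fun h => hm (hiff.mp h))]

-- characterization of B's output
theorem solve_alt_char (g : List (List Int)) (pre : Pre_solve g) :
    ShapeEq (solve_alt g) g ∧ ∀ i j,
      ((MarkH g i j ∨ MarkV g i j) → get2 (solve_alt g) i j = 2) ∧
      (¬ (MarkH g i j ∨ MarkV g i j) → get2 (solve_alt g) i j = get2 g i j) := by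
  have H1 := foldl_mark2 g
      (fun out r c => if tripleH g r c then set2 (set2 (set2 out r c 2) r (c+1) 2) r (c+2) 2 else out)
      (fun r c i j => decide (i = r ∧ (j = c ∨ j = c+1 ∨ j = c+2)) && tripleH g r c)
      (List.range g.length) (fun _ => List.range ((g.headD []).length - 2))
      (fun out r c _ _ hsh => by
        dsimp only
        split_ifs with hp
        · exact shapeEq_set2 _ _ _ _ _ (shapeEq_set2 _ _ _ _ _ (shapeEq_set2 _ _ _ _ _ hsh))
        · exact hsh)
      (fun out r c i j hr hc hsh => by
        dsimp only
        have hr' := List.mem_range.mp hr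
        have hc' := List.mem_range.mp hc
        have hb : c + 2 < (g.getD r []).length := by
          have := rowlen_ge g pre r hr'; omega
        by_cases hp : tripleH g r c = true
        · rw [if_pos hp, get2_set3H g out hsh r c hr' hb]
          refine if_congr ?_ rfl rfl
          simp [hp]
        · have hp' : tripleH g r c = false := by simpa using hp
          rw [if_neg hp]
          simp [hp'])
      g (shapeEq_refl g)
  have H2 := foldl_mark2 g
      (fun out c r => if tripleV g r c then set2 (set2 (set2 out r c 2) (r+1) c 2) (r+2) c 2 else out)
      (fun c r i j => decide ((i = r ∨ i = r+1 ∨ i = r+2) ∧ j = c) && tripleV g r c)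
      (List.range ((g.headD []).length)) (fun _ => List.range (g.length - 2))
      (fun out c r _ _ hsh => by
        dsimp only
        split_ifs with hp
        · exact shapeEq_set2 _ _ _ _ _ (shapeEq_set2 _ _ _ _ _ (shapeEq_set2 _ _ _ _ _ hsh))
        · exact hsh)
      (fun out c r i j hc hr hsh => by
        dsimp only
        have hr' := List.mem_range.mp hr
        have hc' := List.mem_range.mp hc
        have hb : ∀ k, k < g.length → c < (g.getD k []).length := by
          intro k hk
          have := rowlen_ge g pre k hk; omega
        by_cases hp : tripleV g r c = true
        · rw [if_pos hp, get2_set3V g out hsh r c (by omega) hb]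
          refine if_congr ?_ rfl rfl
          simp [hp]
        · have hp' : tripleV g r c = false := by simpa using hp
          rw [if_neg hp]
          simp [hp'])
      _ H1.1
  have halt : solve_alt g = (List.range ((g.headD []).length)).foldl
      (fun out c => (List.range (g.length - 2)).foldl
        (fun out r => if tripleV g r c then set2 (set2 (set2 out r c 2) (r+1) c 2) (r+2) c 2 else out) out)
      ((List.range g.length).foldl
        (fun out r => (List.range ((g.headD []).length - 2)).foldl
          (fun out c => if tripleH g r c then set2 (set2 (set2 out r c 2) r (c+1) 2) r (c+2) 2 else out) out) g) := by
    simp only [solve_alt, copy_eq]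
  rw [halt]
  refine ⟨H2.1, fun i j => ?_⟩
  have hH : ((List.range g.length).any fun r =>
      (List.range ((g.headD []).length - 2)).any fun c =>
        decide (i = r ∧ (j = c ∨ j = c+1 ∨ j = c+2)) && tripleH g r c) = true ↔
      MarkH g i j := by
    unfold MarkH
    simp only [List.any_eq_true, List.mem_range, Bool.and_eq_true, decide_eq_true_eq, and_assoc]
  have hV : ((List.range ((g.headD []).length)).any fun c =>
      (List.range (g.length - 2)).any fun r =>
        decide ((i = r ∨ i = r+1 ∨ i = r+2) ∧ j = c) && tripleV g r c) = true ↔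
      MarkV g i j := by
    unfold MarkV
    simp only [List.any_eq_true, List.mem_range, Bool.and_eq_true, decide_eq_true_eq, and_assoc]
  rw [H2.2 i j, H1.2 i j]
  constructor
  · intro hm
    split_ifs with h1 h2
    · rfl
    · rfl
    · rcases hm with hmH | hmV
      · exact absurd (hH.mpr hmH) h2
      · exact absurd (hV.mpr hmV) h1
  · intro hm
    split_ifs with h1 h2
    · exact absurd (Or.inr (hV.mp h1)) hm
    · exact absurd (Or.inl (hH.mp h2)) hm
    · rfl

theorem eq_of_shape_get2 (a b g : List (List Int)) (ha : ShapeEq a g) (hb : ShapeEq b g)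
    (h : ∀ i j, get2 a i j = get2 b i j) : a = b := by
  apply List.ext_getElem (ha.1.trans hb.1.symm)
  intro i h1 h2
  have hrow : ∀ x : List (List Int), ∀ hx : i < x.length, x.getD i [] = x[i] :=
    fun x hx => List.getD_eq_getElem x [] hx
  apply List.ext_getElem
  · have := (ha.2 i).trans (hb.2 i).symm
    rwa [hrow a h1, hrow b h2] at this
  · intro j hj1 hj2
    have := h i j
    simp only [get2, hrow a h1, hrow b h2] at this
    rwa [List.getD_eq_getElem _ 0 hj1, List.getD_eq_getElem _ 0 hj2] at this

-- ===== VERDICT (by name: the statement is the Claim_ definition above) =====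
theorem solve_spec : Claim_equal_solve := by
  intro g _ pre
  unfold Spec_solve
  obtain ⟨shA, chA⟩ := solve_char g pre
  obtain ⟨shB, chB⟩ := solve_alt_char g pre
  refine eq_of_shape_get2 _ _ g shA shB fun i j => ?_
  by_cases hm : MarkA g i j
  · rw [(chA i j).1 hm, (chB i j).1 ((mark_iff g i j).mp hm)]
  · rw [(chA i j).2 hm, (chB i j).2 (fun h => hm ((mark_iff g i j).mpr h))]
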